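-- pv_equiv track=rewrite | github.com/altheahfy/Rephrase-Project02 | training/data/参考システム/Excel_Generator.py | find_phrase_position
-- ===== SOURCE A (Python) =====
-- def find_phrase_position(words, phrase_words, start_pos=0):
--     """文中でのフレーズの位置を検索（改良版）"""
--     if not phrase_words:
--         return -1
--
--     for i in range(start_pos, len(words) - len(phrase_words) + 1):
--         # 完全一致チェック
--         if words[i:i+len(phrase_words)] == phrase_words:
--             return i
--
--         # 部分一致チェック（大文字小文字無視、句読点除去）
--         normalized_words = [w.lower().rstrip('.,!?:;') for w in words[i:i+len(phrase_words)]]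
--         normalized_phrase = [w.lower().rstrip('.,!?:;') for w in phrase_words]
--
--         if normalized_words == normalized_phrase:
--             return i
--
--         # 単語の一部が一致する場合（"information?"と"information"など）
--         if all(w1.lower().rstrip('.,!?:;').startswith(w2.lower().rstrip('.,!?:;')) or
--                w2.lower().rstrip('.,!?:;').startswith(w1.lower().rstrip('.,!?:;'))
--                for w1, w2 in zip(words[i:i+len(phrase_words)], phrase_words)):
--             return i
--
--     # どうしても見つからない場合、単語単位で検索
--     target_word = phrase_words[0].lower().rstrip('.,!?:;')
--     for i, word in enumerate(words):
--         if word.lower().rstrip('.,!?:;') == target_word: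
--             return i
--
--     return -1  # 見つからない場合
-- ===== SOURCE B (Python) =====
-- def find_phrase_position(words, phrase_words, start_pos=0):
--     """Transposed search: normalize every word once, start from the full list of
--     candidate window starts, and make one pass per phrase word that keeps only
--     the candidates whose word at that offset is compatible; the first survivor
--     (or the single-word fallback) is the answer."""
--     if not phrase_words:
--         return -1
--     punct = '.,!?:;'
--     nwords = [w.lower().rstrip(punct) for w in words]
--     nphrase = [w.lower().rstrip(punct) for w in phrase_words]
--     L = len(nphrase)
--     cand = list(range(max(start_pos, 0), len(words) - L + 1))
--     for j, p in enumerate(nphrase):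
--         cand = [i for i in cand
--                 if nwords[i + j].startswith(p) or p.startswith(nwords[i + j])]
--     if cand:
--         return cand[0]
--     target = nphrase[0]
--     return nwords.index(target) if target in nwords else -1
-- ===== Notes on version B (the rewrite author's own statement) =====
-- stated objective: alternative
-- what changed: B transposes the search: instead of A's position-major scan that re-normalizes the phrase and re-tests a whole window at each start, B normalizes everything once, starts from the full list of candidate window starts, and makes one filtering pass per phrase word that keeps only the candidates whose word at that offset is compatible; the first survivor (or the list.index fallback) is returned, and A's inner per-window test disappears.
-- outside the precondition, e.g. on find_phrase_position(['a', 'b'], ['x', 'y'], -5): A returns -5, B returns -1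
import Mathlib
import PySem

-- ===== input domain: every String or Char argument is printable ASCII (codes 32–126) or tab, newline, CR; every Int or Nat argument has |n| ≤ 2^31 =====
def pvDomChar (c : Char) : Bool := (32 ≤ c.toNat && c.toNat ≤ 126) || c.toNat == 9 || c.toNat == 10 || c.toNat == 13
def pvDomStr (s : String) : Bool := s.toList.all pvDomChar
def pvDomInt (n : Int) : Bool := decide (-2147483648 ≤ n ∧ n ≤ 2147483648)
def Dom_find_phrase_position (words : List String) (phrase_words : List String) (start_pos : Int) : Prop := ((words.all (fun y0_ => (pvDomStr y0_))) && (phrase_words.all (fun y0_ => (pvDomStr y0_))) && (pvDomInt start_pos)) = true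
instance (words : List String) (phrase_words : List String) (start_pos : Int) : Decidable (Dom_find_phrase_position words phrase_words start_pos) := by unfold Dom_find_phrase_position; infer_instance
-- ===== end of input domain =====

-- B transposes the search: one pass per phrase word over the once-normalized word list builds the
-- set of compatible window starts; the intersected candidates replace A's per-position window scan
-- (objective: alternative; same return value on Pre_, i.e. for 0 ≤ start_pos).

-- w.lower().rstrip('.,!?:;') — hand-ported rstrip(chars): drop trailing chars from the set
-- (exact: Python's rstrip(chars) removes exactly the maximal trailing run of chars in the set).
def pvNorm (w : String) : List Char :=
  (((PySem.Str.lower w).toList.reverse.dropWhile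
      (fun c => c ∈ ['.', ',', '!', '?', ':', ';'])).reverse)

-- ===== PORT A =====
-- the 'all(... for w1, w2 in zip(...))' test of A's third branch, per pair
def pvFuzzy (w1 w2 : String) : Bool :=
  PySem.Chars.startswith (pvNorm w1) (pvNorm w2) || PySem.Chars.startswith (pvNorm w2) (pvNorm w1)

-- A's first loop 'for i in range(start_pos, len(words)-len(phrase_words)+1)' (lazy, like Python's range)
def pvLoopA (words phrase_words : List String) (L stop i : Int) : Option Int :=
  if i < stop then
    let seg := PySem.List.slice words (some i) (some (i + L))
    if seg = phrase_words then some i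
    else if seg.map pvNorm = phrase_words.map pvNorm then some i
    else if (seg.zip phrase_words).all (fun p => pvFuzzy p.1 p.2) then some i
    else pvLoopA words phrase_words L stop (i + 1)
  else none
termination_by (stop - i).toNat
decreasing_by omega

-- A's fallback loop 'for i, word in enumerate(words)'
def pvFallA (target : List Char) : List (Int × String) → Int
  | [] => -1
  | (i, w) :: rest => if pvNorm w = target then i else pvFallA target rest

def find_phrase_position (words : List String) (phrase_words : List String) (start_pos : Int) : Int :=
  match phrase_words with
  | [] => -1
  | p0 :: _ =>
    let L : Int := (phrase_words.length : Int)
    match pvLoopA words phrase_words L ((words.length : Int) - L + 1) start_pos with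
    | some i => i
    | none => pvFallA (pvNorm p0) (PySem.List.enumerate words 0)

-- ===== PORT B =====
-- the per-pair test 'nw.startswith(p) or p.startswith(nw)' on normalized words
def pvFuzzyN (a b : List Char) : Bool :=
  PySem.Chars.startswith a b || PySem.Chars.startswith b a

def find_phrase_position_alt (words : List String) (phrase_words : List String) (start_pos : Int) : Int :=
  match phrase_words with
  | [] => -1
  | _ :: _ =>
    let nwords := words.map pvNorm
    let nphrase := phrase_words.map pvNorm
    let L : Int := (nphrase.length : Int)
    -- cand = list(range(max(start_pos, 0), len(words) - L + 1)), then filtered once per phrase word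
    let cand0 := PySem.List.pyRange (max start_pos 0) ((words.length : Int) - L + 1)
    -- nwords[i + j]: every i kept in cand satisfies 0 <= i and i + j < len(nwords), so Python's
    -- indexing never raises there; pyGetD with default [] is exact on those indices
    let cand := (PySem.List.enumerate nphrase 0).foldl
      (fun c jp => c.filter (fun i =>
        pvFuzzyN (PySem.List.pyGetD nwords (i + jp.1) []) jp.2)) cand0
    match cand with
    | i :: _ => i
    | [] =>
      -- 'nwords.index(target) if target in nwords else -1'
      match PySem.List.index? nwords (nphrase.headD []) with
      | some i => (i : Int)
      | none => -1

-- ===== PRECONDITION & SPEC =====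
-- Pre_ restricts to the natural domain of a scan start position: for start_pos < 0 (outside it),
-- A's slice words[i:i+L] wraps or truncates, the 'all' over the shortened zip can fire vacuously,
-- and A returns a meaningless negative index that B's candidate search does not reproduce.
def Pre_find_phrase_position (words : List String) (phrase_words : List String) (start_pos : Int) : Prop :=
  0 ≤ start_pos
instance (words : List String) (phrase_words : List String) (start_pos : Int) : Decidable (Pre_find_phrase_position words phrase_words start_pos) := by unfold Pre_find_phrase_position; infer_instance

def pvWitness_find_phrase_position : List String × List String × Int :=
  (["the", "Cat.", "sat"], ["cat"], 0)

def Spec_find_phrase_position (words : List String) (phrase_words : List String) (start_pos : Int) (out : Int) : Prop := out = find_phrase_position_alt words phrase_words start_pos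
instance (words : List String) (phrase_words : List String) (start_pos : Int) (out : Int) : Decidable (Spec_find_phrase_position words phrase_words start_pos out) := by unfold Spec_find_phrase_position; infer_instance

-- ===== CLAIM (what is proved, stated in full; the proofs are below) =====
def Claim_equal_find_phrase_position : Prop := ∀ (words : List String) (phrase_words : List String) (start_pos : Int), Dom_find_phrase_position words phrase_words start_pos → Pre_find_phrase_position words phrase_words start_pos → Spec_find_phrase_position words phrase_words start_pos (find_phrase_position words phrase_words start_pos)

-- ===== LEMMAS AND PROOFS =====

-- the collapsed per-window test: A's three branches all fire exactly when this holds
def pvW (words phrase_words : List String) (L i : Int) : Bool :=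
  ((PySem.List.slice words (some i) (some (i + L))).zip phrase_words).all
    (fun p => pvFuzzy p.1 p.2)

-- a list zipped with itself passes the bidirectional-prefix test
theorem pv_zip_self_all (l : List String) :
    (l.zip l).all (fun p => pvFuzzy p.1 p.2) = true := by
  induction l with
  | nil => rfl
  | cons x xs ih =>
    rw [List.zip_cons_cons, List.all_cons, ih]
    simp [pvFuzzy, PySem.Chars.startswith_iff]

-- normalized equality of the window also passes the test
theorem pv_normeq_all (a b : List String) (h : a.map pvNorm = b.map pvNorm) :
    (a.zip b).all (fun p => pvFuzzy p.1 p.2) = true := by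
  induction a generalizing b with
  | nil => rfl
  | cons x xs ih =>
    cases b with
    | nil => rfl
    | cons y ys =>
      simp only [List.map_cons, List.cons.injEq] at h
      rw [List.zip_cons_cons, List.all_cons, ih ys h.2]
      simp [pvFuzzy, h.1, PySem.Chars.startswith_iff]

-- A's loop returns the first position in [i, stop) passing the collapsed test
theorem pv_loopA_char (words phrase_words : List String) (L stop i : Int) :
    pvLoopA words phrase_words L stop i
      = ((PySem.List.pyRange i stop).filter (pvW words phrase_words L)).head? := by
  have key : ∀ (n : Nat) (i : Int), (stop - i).toNat ≤ n →
      pvLoopA words phrase_words L stop i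
        = ((PySem.List.pyRange i stop).filter (pvW words phrase_words L)).head? := by
    intro n
    induction n with
    | zero =>
      intro i hle
      have hge : stop ≤ i := by omega
      rw [pvLoopA, PySem.List.pyRange_one_eq_nil hge]
      simp [not_lt.mpr hge]
    | succ n ih =>
      intro i hle
      rw [pvLoopA]
      by_cases hlt : i < stop
      · rw [PySem.List.pyRange_one_cons hlt]
        simp only [hlt, if_true, List.filter_cons]
        by_cases hW : pvW words phrase_words L i = true
        · have hW' := hW
          unfold pvW at hW'
          simp only [hW, hW', if_true, List.head?_cons]
          split_ifs <;> rfl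
        · have h1 : PySem.List.slice words (some i) (some (i + L)) ≠ phrase_words := by
            intro he
            apply hW
            unfold pvW; rw [he]; exact pv_zip_self_all _
          have h2 : (PySem.List.slice words (some i) (some (i + L))).map pvNorm
              ≠ phrase_words.map pvNorm := by
            intro he
            exact hW (pv_normeq_all _ _ he)
          have h3 : ((PySem.List.slice words (some i) (some (i + L))).zip phrase_words).all
              (fun p => pvFuzzy p.1 p.2) ≠ true := hW
          simp only [h1, h2, if_false]
          rw [if_neg h3, ih (i + 1) (by omega), if_neg hW]
      · rw [PySem.List.pyRange_one_eq_nil (by omega)]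
        simp [hlt]
  exact key (stop - i).toNat i le_rfl

-- B's fold of filters is one filter by the conjunction of all the per-word tests
theorem pv_foldl_filter {α β : Type} (P : β → α → Bool) :
    ∀ (js : List β) (c0 : List α),
      (js.foldl (fun c jp => c.filter (P jp)) c0)
        = c0.filter (fun i => js.all (fun jp => P jp i)) := by
  intro js
  induction js with
  | nil => intro c0; simp
  | cons j rest ih =>
    intro c0
    simp only [List.foldl_cons, ih, List.filter_filter, List.all_cons]
    apply List.filter_congr
    intro x _
    simp [Bool.and_comm]

-- for i in the candidate range, B's conjunction over phrase offsets equals A's window test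
theorem pv_all_eq_W (words phrase_words : List String) (i : Int)
    (hi : 0 ≤ i) (hstop : i + (phrase_words.length : Int) ≤ (words.length : Int)) :
    (PySem.List.enumerate (phrase_words.map pvNorm) 0).all
        (fun jp => pvFuzzyN (PySem.List.pyGetD (words.map pvNorm) (i + jp.1) []) jp.2)
      = pvW words phrase_words ((phrase_words.length : Int)) i := by
  have hget : ∀ (j : Nat) (hjl : j < phrase_words.length),
      PySem.List.pyGetD (words.map pvNorm) (i + (j : Int)) []
        = pvNorm (words[i.toNat + j]'(by omega)) := by
    intro j hj
    rw [PySem.List.pyGetD_of_nonneg _ _ (by omega)]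
    have htn : (i + (j : Int)).toNat = i.toNat + j := by omega
    rw [htn, List.getD_eq_getElem _ _ (by simp; omega)]
    simp
  have hslice : PySem.List.slice words (some i) (some (i + (phrase_words.length : Int)))
      = (words.drop i.toNat).take phrase_words.length := by
    rw [PySem.List.slice_toNat words hi (by omega)]
    congr 1
    omega
  unfold pvW
  rw [hslice]
  rw [Bool.eq_iff_iff, List.all_eq_true, List.all_eq_true]
  constructor
  · intro h pr hpr
    rw [List.mem_iff_getElem] at hpr
    obtain ⟨j, hj, rfl⟩ := hpr
    have hjlen : j < phrase_words.length := by
      have := hj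
      simp [List.length_zip] at this
      omega
    have hmem : ((j : Int), pvNorm phrase_words[j]) ∈ PySem.List.enumerate (phrase_words.map pvNorm) 0 := by
      rw [PySem.List.mem_enumerate_iff]
      exact ⟨j, by simpa using hjlen, by simp⟩
    have := h _ hmem
    simp only at this
    rw [hget j hjlen] at this
    simp only [List.getElem_zip, List.getElem_take, List.getElem_drop] at this ⊢
    simpa [pvFuzzy, pvFuzzyN] using this
  · intro h jp hjp
    rw [PySem.List.mem_enumerate_iff] at hjp
    obtain ⟨j, hj, rfl⟩ := hjp
    have hjlen : j < phrase_words.length := by simpa using hj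
    simp only [zero_add]
    rw [hget j hjlen]
    have hzlen : j < (((words.drop i.toNat).take phrase_words.length).zip phrase_words).length := by
      simp [List.length_zip]
      omega
    have := h _ (List.getElem_mem hzlen)
    simp only [List.getElem_zip, List.getElem_take, List.getElem_drop] at this
    simpa [pvFuzzy, pvFuzzyN] using this

-- A's fallback scan equals B's index? on the pre-normalized list
theorem pv_fall_eq (target : List Char) (words : List String) (s : Int) :
    pvFallA target (PySem.List.enumerate words s)
      = (match PySem.List.index? (words.map pvNorm) target with
         | some k => s + (k : Int)
         | none => -1) := by
  induction words generalizing s with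
  | nil => rfl
  | cons w ws ih =>
    rw [PySem.List.enumerate_cons]
    by_cases h : pvNorm w = target
    · simp only [pvFallA, if_pos h, List.map_cons, h, PySem.List.index?_cons_self]
      simp
    · simp only [pvFallA, if_neg h, List.map_cons, ih (s + 1),
        PySem.List.index?_cons_of_ne ((ws.map pvNorm)) h]
      cases PySem.List.index? (ws.map pvNorm) target with
      | none => rfl
      | some k =>
        simp only [Option.map_some]
        push_cast
        ring

-- ===== VERDICT (by name: the statement is the Claim_ definition above) =====
theorem find_phrase_position_spec : Claim_equal_find_phrase_position := by
  intro words phrase_words start_pos _ hpre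
  unfold Spec_find_phrase_position find_phrase_position find_phrase_position_alt
  cases phrase_words with
  | nil => rfl
  | cons p0 ps =>
    simp only []
    have hmax : max start_pos 0 = start_pos := by
      unfold Pre_find_phrase_position at hpre; omega
    rw [hmax]
    set pw := p0 :: ps
    have hlen : ((pw.map pvNorm).length : Int) = (pw.length : Int) := by simp
    rw [hlen]
    set L : Int := (pw.length : Int)
    set stop : Int := (words.length : Int) - L + 1
    rw [pv_loopA_char, pv_foldl_filter]
    have hfilter : (PySem.List.pyRange start_pos stop).filter
        (fun i => (PySem.List.enumerate (pw.map pvNorm) 0).all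
          (fun jp => pvFuzzyN (PySem.List.pyGetD (words.map pvNorm) (i + jp.1) []) jp.2))
        = (PySem.List.pyRange start_pos stop).filter (pvW words pw L) := by
      apply List.filter_congr
      intro i hi
      rw [PySem.List.mem_pyRange_one] at hi
      exact pv_all_eq_W words pw i (by omega) (by simp only [stop, L] at hi ⊢; omega)
    rw [hfilter]
    cases hc : (PySem.List.pyRange start_pos stop).filter (pvW words pw L) with
    | cons i rest => simp [List.head?]
    | nil =>
      simp only [List.head?]
      have hhead : (pw.map pvNorm).headD [] = pvNorm p0 := by simp [pw]
      rw [hhead, pv_fall_eq (pvNorm p0) words 0]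
      cases PySem.List.index? (words.map pvNorm) (pvNorm p0) with
      | none => rfl
      | some k => simp
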